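-- pv_equiv track=rewrite | github.com/silentcorn/Primer-Design | primer.py | primer_dimer
-- ===== SOURCE A (Python) =====
-- def primer_dimer(x, y):
--     match_occurences_AT = []
--     consecutive_AT = 0
--     max_consecutive_AT = 0
--     for index, (nuc_a, nuc_t) in enumerate(zip(x, y)):
--         if nuc_a == 'A' and nuc_t == 'T':
--             match_occurences_AT.append(index)
--             if len(match_occurences_AT) > 1 and match_occurences_AT[-1] == match_occurences_AT[-2] + 1:
--                 consecutive_AT += 1
--             else:
--                 consecutive_AT = 1
--             max_consecutive_AT = max(max_consecutive_AT, consecutive_AT)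
--
--
--     match_occurences_GC = []
--     consecutive_GC = 0
--     max_consecutive_GC = 0
--     for index, (nuc_a, nuc_t) in enumerate(zip(x, y)):
--         if nuc_a == 'G' and nuc_t == 'C':
--             match_occurences_GC.append(index)
--             if len(match_occurences_GC) > 1 and match_occurences_GC[-1] == match_occurences_GC[-2] + 1:
--                 consecutive_GC += 1
--             else:
--                 consecutive_GC = 1
--             max_consecutive_GC = max(max_consecutive_GC, consecutive_GC)
--     #setting max consecutive complimentary base pairs to 3, total complimentary base paris to 4
--     if max_consecutive_AT < 4 and len(match_occurences_AT) < 5 and max_consecutive_GC < 4 and len(match_occurences_GC) < 5: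
--         return 0
--     else:
--         return 1
-- ===== SOURCE B (Python) =====
-- def primer_dimer(x, y):
--     at_mask = ''.join('1' if a == 'A' and b == 'T' else '0' for a, b in zip(x, y))
--     cg_mask = ''.join('1' if a == 'G' and b == 'C' else '0' for a, b in zip(x, y))
--     if '1111' in at_mask or at_mask.count('1') >= 5 or '1111' in cg_mask or cg_mask.count('1') >= 5:
--         return 1
--     return 0
-- ===== Notes on version B (the rewrite author's own statement) =====
-- stated objective: idiomatic
-- what changed: Replaces A's two passes that build match-index lists and compare the last two indices to track consecutive runs with building a 0/1 complementarity mask string per channel and deciding via substring search ('1111' in mask) and a character count ('1's >= 5).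
import Mathlib
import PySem

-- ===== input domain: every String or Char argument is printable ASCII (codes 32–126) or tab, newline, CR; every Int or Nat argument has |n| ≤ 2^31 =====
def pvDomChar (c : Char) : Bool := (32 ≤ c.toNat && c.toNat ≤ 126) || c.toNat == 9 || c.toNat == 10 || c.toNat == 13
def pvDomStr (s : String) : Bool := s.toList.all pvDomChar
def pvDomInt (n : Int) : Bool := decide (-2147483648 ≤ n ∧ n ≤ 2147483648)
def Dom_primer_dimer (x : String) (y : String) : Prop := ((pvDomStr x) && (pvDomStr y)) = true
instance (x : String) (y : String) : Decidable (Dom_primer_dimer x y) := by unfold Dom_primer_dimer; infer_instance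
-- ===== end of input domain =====

-- B replaces A's run-tracking over match-index lists by a 0/1 mask string decided with
-- substring search ('1111' in mask) and a character count (objective: idiomatic).

-- ===== PORT A =====
-- A's loop body (both loops of A have this shape, with the matched pair of characters
-- as parameters); state = (match_occurences, consecutive, max_consecutive)
def pdStep (c1 c2 : Char) (s : List Int × Int × Int) (e : Int × (Char × Char)) :
    List Int × Int × Int :=
  if e.2.1 = c1 ∧ e.2.2 = c2 then
    let lst := s.1 ++ [e.1]
    let cons :=
      if 1 < lst.length ∧
          PySem.List.pyGet? lst (-1) = (PySem.List.pyGet? lst (-2)).map (· + 1) then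
        s.2.1 + 1
      else 1
    (lst, cons, max s.2.2 cons)
  else s

def pdLoop (c1 c2 : Char) (x y : String) : List Int × Int × Int :=
  (PySem.List.enumerate (x.toList.zip y.toList) 0).foldl (pdStep c1 c2) ([], 0, 0)

def primer_dimer (x : String) (y : String) : Int :=
  let rAT := pdLoop 'A' 'T' x y
  let rGC := pdLoop 'G' 'C' x y
  if rAT.2.2 < 4 ∧ (rAT.1.length : Int) < 5 ∧ rGC.2.2 < 4 ∧ (rGC.1.length : Int) < 5
  then 0 else 1

-- ===== PORT B =====
-- the mask string ''.join('1' if a == c1 and b == c2 else '0' for a, b in zip(x, y))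
def pdMask (c1 c2 : Char) (l : List (Char × Char)) : List Char :=
  l.map (fun p => if p.1 = c1 ∧ p.2 = c2 then '1' else '0')

def primer_dimer_alt (x : String) (y : String) : Int :=
  let at_ := pdMask 'A' 'T' (x.toList.zip y.toList)
  let gc_ := pdMask 'G' 'C' (x.toList.zip y.toList)
  if PySem.Chars.isIn ['1', '1', '1', '1'] at_ || 5 ≤ at_.count '1' ||
      PySem.Chars.isIn ['1', '1', '1', '1'] gc_ || 5 ≤ gc_.count '1'
  then 1 else 0

-- ===== PRECONDITION & SPEC =====
def Spec_primer_dimer (x : String) (y : String) (out : Int) : Prop := out = primer_dimer_alt x y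
instance (x : String) (y : String) (out : Int) : Decidable (Spec_primer_dimer x y out) := by unfold Spec_primer_dimer; infer_instance

-- ===== CLAIM (what is proved, stated in full; the proofs are below) =====
def Claim_equal_primer_dimer : Prop := ∀ (x : String) (y : String), Dom_primer_dimer x y → Spec_primer_dimer x y (primer_dimer x y)

-- ===== LEMMAS AND PROOFS =====

-- reference counters (proof-only): state = (current run, max run, total matches)
def runStep (c1 c2 : Char) (s : Int × Int × Int) (p : Char × Char) : Int × Int × Int :=
  if p.1 = c1 ∧ p.2 = c2 then
    let cur := s.1 + 1
    (cur, if cur > s.2.1 then cur else s.2.1, s.2.2 + 1)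
  else (0, s.2.1, s.2.2)

theorem pv_pyGet?_neg2 (l : List Int) (a : Int) (h : l ≠ []) :
    PySem.List.pyGet? (l ++ [a]) (-2) = l.getLast? := by
  have hpos : 0 < l.length := List.length_pos_iff.mpr h
  have hlen : 2 ≤ (l ++ [a]).length := by simp; omega
  rw [PySem.List.pyGet?_neg_ofNat _ 2 (by omega) hlen]
  have h2 : (l ++ [a]).length - 2 = l.length - 1 := by simp
  rw [h2, List.getElem?_append_left (by omega), List.getLast?_eq_getElem?]

-- invariant linking A's (match_occurences, consecutive, max) state with the counters
theorem pv_loop_inv (c1 c2 : Char) (l : List (Char × Char)) (k : Int)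
    (lst : List Int) (cons mx cur tot : Int)
    (hlen : (lst.length : Int) = tot)
    (hlt : ∀ v ∈ lst, v < k)
    (hcur : (cur = 0 ∧ lst.getLast? ≠ some (k - 1)) ∨
            (0 < cur ∧ lst.getLast? = some (k - 1) ∧ cons = cur)) :
    ((PySem.List.enumerate l k).foldl (pdStep c1 c2) (lst, cons, mx)).2.2 =
      (l.foldl (runStep c1 c2) (cur, mx, tot)).2.1 ∧
    ((((PySem.List.enumerate l k).foldl (pdStep c1 c2) (lst, cons, mx)).1.length : Int) =
      (l.foldl (runStep c1 c2) (cur, mx, tot)).2.2) := by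
  induction l generalizing k lst cons mx cur tot with
  | nil => exact ⟨rfl, hlen⟩
  | cons p l ih =>
    rw [PySem.List.enumerate_cons]
    simp only [List.foldl_cons]
    by_cases hm : p.1 = c1 ∧ p.2 = c2
    · -- matching position
      have hlast : PySem.List.pyGet? (lst ++ [k]) (-1) = some k :=
        PySem.List.pyGet?_neg_one_append_singleton lst k
      rcases hcur with ⟨hc0, hne⟩ | ⟨hcpos, hl, hceq⟩
      · -- run restarts: A's adjacency test is false
        have hcond : ¬ (1 < (lst ++ [k]).length ∧
            PySem.List.pyGet? (lst ++ [k]) (-1) =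
              (PySem.List.pyGet? (lst ++ [k]) (-2)).map (· + 1)) := by
          rintro ⟨h1, h2⟩
          have hne' : lst ≠ [] := by
            intro h; subst h; simp at h1
          rw [hlast, pv_pyGet?_neg2 _ _ hne'] at h2
          rcases hg : lst.getLast? with _ | v
          · rw [hg] at h2; simp at h2
          · rw [hg] at h2
            simp only [Option.map_some] at h2
            exact hne (by rw [hg]; exact congrArg some (by have h3 := Option.some.inj h2; omega))
        simp only [pdStep, runStep, hm, if_neg hcond]
        subst hc0
        have : (if (0 : Int) + 1 > mx then (0 : Int) + 1 else mx) = max mx 1 := by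
          split <;> omega
        rw [this]
        refine ih (k + 1) (lst ++ [k]) 1 (max mx 1) 1 (tot + 1)
          (by simp only [List.length_append, List.length_cons, List.length_nil]; push_cast; omega) ?_ (Or.inr ⟨by omega, by simp, rfl⟩)
        intro v hv
        rcases List.mem_append.mp hv with h | h
        · exact lt_trans (hlt v h) (by omega)
        · simp at h; omega
      · -- run continues: A's adjacency test is true
        have hne' : lst ≠ [] := by
          intro h; subst h; simp at hl
        have hcond : 1 < (lst ++ [k]).length ∧
            PySem.List.pyGet? (lst ++ [k]) (-1) =
              (PySem.List.pyGet? (lst ++ [k]) (-2)).map (· + 1) := by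
          constructor
          · have := List.length_pos_iff.mpr hne'; simp; omega
          · rw [hlast, pv_pyGet?_neg2 _ _ hne', hl]
            simp only [Option.map_some]
            exact congrArg some (by omega)
        simp only [pdStep, runStep, hm, if_pos hcond]
        subst hceq
        have : (if cons + 1 > mx then cons + 1 else mx) = max mx (cons + 1) := by
          split <;> omega
        rw [this]
        refine ih (k + 1) (lst ++ [k]) (cons + 1) (max mx (cons + 1)) (cons + 1) (tot + 1)
          (by simp only [List.length_append, List.length_cons, List.length_nil]; push_cast; omega) ?_ (Or.inr ⟨by omega, by simp, rfl⟩)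
        intro v hv
        rcases List.mem_append.mp hv with h | h
        · exact lt_trans (hlt v h) (by omega)
        · simp at h; omega
    · -- non-matching position: A keeps its state, the counters reset cur to 0
      simp only [pdStep, runStep, hm, ite_false]
      refine ih (k + 1) lst cons mx 0 tot hlen ?_ (Or.inl ⟨rfl, ?_⟩)
      · intro v hv; exact lt_trans (hlt v hv) (by omega)
      · intro hg
        have hv : (k + 1 - 1) ∈ lst := List.mem_of_getLast? hg
        have := hlt _ hv
        omega

-- the total counter is the number of '1's in the mask
theorem pv_count_inv (c1 c2 : Char) (l : List (Char × Char)) (cur mx tot : Int) :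
    (l.foldl (runStep c1 c2) (cur, mx, tot)).2.2 =
      tot + ((pdMask c1 c2 l).count '1' : Int) := by
  induction l generalizing cur mx tot with
  | nil => simp [pdMask]
  | cons p l ih =>
    by_cases hm : p.1 = c1 ∧ p.2 = c2 <;>
      (simp [pdMask, runStep, hm, List.foldl_cons, ih] at *; try omega)

-- no '1111' starts inside a block of at most three '1's followed by a '0'
theorem pv_no_quad_prefix (k : Nat) (hk : k ≤ 3) (xs : List Char) :
    ¬ (['1', '1', '1', '1'] <+: List.replicate k '1' ++ '0' :: xs) := by
  intro hpre
  interval_cases k <;> simp_all [List.cons_prefix_cons, List.replicate]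

-- substring search across the mask ignores a too-short leading run of '1's
theorem pv_isIn_ones_zero (k : Nat) (hk : k ≤ 3) (xs : List Char) :
    PySem.Chars.isIn ['1', '1', '1', '1'] (List.replicate k '1' ++ '0' :: xs) =
      PySem.Chars.isIn ['1', '1', '1', '1'] xs := by
  rw [Bool.eq_iff_iff, ← PySem.Chars.exists_prefix_drop_iff_isIn,
    ← PySem.Chars.exists_prefix_drop_iff_isIn]
  constructor
  · rintro ⟨j, hj⟩
    by_cases hjk : j ≤ k
    · exfalso
      simp only [List.drop_append, List.drop_replicate, List.length_replicate,
        Nat.sub_eq_zero_of_le hjk, List.drop_zero] at hj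
      exact pv_no_quad_prefix (k - j) (by omega) xs hj
    · refine ⟨j - (k + 1), ?_⟩
      simp only [List.drop_append, List.drop_replicate, List.length_replicate,
        Nat.sub_eq_zero_of_le (show k ≤ j by omega), List.replicate_zero, List.nil_append,
        show j - k = (j - (k + 1)) + 1 by omega, List.drop_succ_cons] at hj
      exact hj
  · rintro ⟨j, hj⟩
    refine ⟨k + 1 + j, ?_⟩
    simp only [List.drop_append, List.drop_replicate, List.length_replicate,
      Nat.sub_eq_zero_of_le (show k ≤ k + 1 + j by omega), List.replicate_zero,
      List.nil_append, show k + 1 + j - k = j + 1 by omega, List.drop_succ_cons]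
    exact hj

-- a run of at least four '1's is found by the substring search
theorem pv_isIn_ones_ge (k : Nat) (hk : 4 ≤ k) (xs : List Char) :
    PySem.Chars.isIn ['1', '1', '1', '1'] (List.replicate k '1' ++ xs) = true := by
  rw [← PySem.Chars.exists_prefix_drop_iff_isIn]
  refine ⟨0, ?_⟩
  obtain ⟨m, rfl⟩ := Nat.exists_eq_add_of_le hk
  rw [List.drop_zero, List.replicate_add]
  exact ⟨List.replicate m '1' ++ xs, by simp [List.replicate]⟩

-- the max-run counter crosses 4 exactly when the mask contains '1111'
theorem pv_run_inv (c1 c2 : Char) (l : List (Char × Char)) (cur mx tot : Int)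
    (h0 : 0 ≤ cur) (hcm : cur ≤ mx) :
    ((l.foldl (runStep c1 c2) (cur, mx, tot)).2.1 < 4 ↔
      mx < 4 ∧ PySem.Chars.isIn ['1', '1', '1', '1']
        (List.replicate cur.toNat '1' ++ pdMask c1 c2 l) = false) := by
  induction l generalizing cur mx tot with
  | nil =>
    simp only [List.foldl_nil, pdMask, List.map_nil, List.append_nil]
    constructor
    · intro h
      refine ⟨h, ?_⟩
      rw [PySem.Chars.isIn_eq_false_iff]
      intro hinf
      have hlen : 4 ≤ (List.replicate cur.toNat '1').length := by
        have := hinf.length_le; simpa using this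
      simp at hlen; omega
    · intro h; exact h.1
  | cons p l ih =>
    simp only [List.foldl_cons, pdMask, List.map_cons]
    by_cases hm : p.1 = c1 ∧ p.2 = c2
    · have hstep : runStep c1 c2 (cur, mx, tot) p = (cur + 1, max mx (cur + 1), tot + 1) := by
        simp only [runStep, if_pos hm]
        have : (if cur + 1 > mx then cur + 1 else mx) = max mx (cur + 1) := by
          split <;> omega
        rw [this]
      rw [hstep, if_pos hm]
      have hmask : List.replicate cur.toNat '1' ++ '1' :: pdMask c1 c2 l =
          List.replicate (cur + 1).toNat '1' ++ pdMask c1 c2 l := by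
        rw [show (cur + 1).toNat = cur.toNat + 1 by omega, List.replicate_succ']
        simp
      rw [show List.replicate cur.toNat '1' ++ '1' ::
            List.map (fun p => if p.1 = c1 ∧ p.2 = c2 then '1' else '0') l =
          List.replicate (cur + 1).toNat '1' ++ pdMask c1 c2 l from hmask,
        ih (cur + 1) (max mx (cur + 1)) (tot + 1) (by omega) (by omega)]
      constructor
      · rintro ⟨h1, h2⟩
        exact ⟨by omega, h2⟩
      · rintro ⟨h1, h2⟩
        refine ⟨?_, h2⟩
        by_cases hc : cur + 1 < 4
        · omega
        · exfalso
          rw [pv_isIn_ones_ge _ (by omega)] at h2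
          exact Bool.noConfusion h2
    · have hstep : runStep c1 c2 (cur, mx, tot) p = (0, mx, tot) := by
        simp [runStep, hm]
      rw [hstep, if_neg hm]
      have h2 := ih 0 mx tot (by omega) (by omega)
      simp only [Int.toNat_zero, List.replicate_zero, List.nil_append] at h2
      rw [h2]
      constructor
      · rintro ⟨h1, h3⟩
        refine ⟨h1, ?_⟩
        rw [pv_isIn_ones_zero cur.toNat (by omega)]
        exact h3
      · rintro ⟨h1, h3⟩
        refine ⟨h1, ?_⟩
        rw [pv_isIn_ones_zero cur.toNat (by omega)] at h3
        exact h3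

-- ===== VERDICT (by name: the statement is the Claim_ definition above) =====
theorem primer_dimer_spec : Claim_equal_primer_dimer := by
  intro x y _
  show primer_dimer x y = primer_dimer_alt x y
  unfold primer_dimer primer_dimer_alt pdLoop
  have hAT := pv_loop_inv 'A' 'T' (x.toList.zip y.toList) 0 [] 0 0 0 0
    (by simp) (by simp) (Or.inl ⟨rfl, by simp⟩)
  have hGC := pv_loop_inv 'G' 'C' (x.toList.zip y.toList) 0 [] 0 0 0 0
    (by simp) (by simp) (Or.inl ⟨rfl, by simp⟩)
  have hrAT := pv_run_inv 'A' 'T' (x.toList.zip y.toList) 0 0 0 (by omega) (by omega)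
  have hrGC := pv_run_inv 'G' 'C' (x.toList.zip y.toList) 0 0 0 (by omega) (by omega)
  have hcAT := pv_count_inv 'A' 'T' (x.toList.zip y.toList) 0 0 0
  have hcGC := pv_count_inv 'G' 'C' (x.toList.zip y.toList) 0 0 0
  simp only [Int.toNat_zero, List.replicate_zero, List.nil_append] at hrAT hrGC
  have hiff :
      (((PySem.List.enumerate (x.toList.zip y.toList) 0).foldl (pdStep 'A' 'T') ([], 0, 0)).2.2 < 4 ∧
        ((((PySem.List.enumerate (x.toList.zip y.toList) 0).foldl (pdStep 'A' 'T') ([], 0, 0)).1.length : Int) < 5) ∧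
        ((PySem.List.enumerate (x.toList.zip y.toList) 0).foldl (pdStep 'G' 'C') ([], 0, 0)).2.2 < 4 ∧
        ((((PySem.List.enumerate (x.toList.zip y.toList) 0).foldl (pdStep 'G' 'C') ([], 0, 0)).1.length : Int) < 5))
      ↔ ¬ ((PySem.Chars.isIn ['1', '1', '1', '1'] (pdMask 'A' 'T' (x.toList.zip y.toList)) ||
              decide (5 ≤ (pdMask 'A' 'T' (x.toList.zip y.toList)).count '1') ||
              PySem.Chars.isIn ['1', '1', '1', '1'] (pdMask 'G' 'C' (x.toList.zip y.toList)) ||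
              decide (5 ≤ (pdMask 'G' 'C' (x.toList.zip y.toList)).count '1')) = true) := by
    rw [hAT.1, hAT.2, hGC.1, hGC.2, hcAT, hcGC, hrAT, hrGC]
    simp only [Bool.or_eq_true, not_or, decide_eq_true_eq]
    constructor
    · rintro ⟨⟨-, e1⟩, e2, ⟨-, e3⟩, e4⟩
      refine ⟨⟨⟨by simp [e1], by omega⟩, by simp [e3]⟩, by omega⟩
    · rintro ⟨⟨⟨e1, e2⟩, e3⟩, e4⟩
      exact ⟨⟨by omega, by simpa using e1⟩, by omega, ⟨by omega, by simpa using e3⟩, by omega⟩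
  by_cases hc : ((PySem.Chars.isIn ['1', '1', '1', '1'] (pdMask 'A' 'T' (x.toList.zip y.toList)) ||
      decide (5 ≤ (pdMask 'A' 'T' (x.toList.zip y.toList)).count '1') ||
      PySem.Chars.isIn ['1', '1', '1', '1'] (pdMask 'G' 'C' (x.toList.zip y.toList)) ||
      decide (5 ≤ (pdMask 'G' 'C' (x.toList.zip y.toList)).count '1')) = true)
  · rw [if_pos hc, if_neg (by rw [hiff]; exact fun h => h hc)]
  · rw [if_neg hc, if_pos (hiff.mpr hc)]
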